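-- pv_equiv track=rewrite | github.com/peytonramsey/gym_log | utils.py | reorder_exercise_words
-- ===== SOURCE A (Python) =====
-- POSITION_WORDS = [
--     'incline', 'decline', 'flat', 'seated', 'standing', 'lying', 'kneeling',
--     'prone', 'supine', 'bent over', 'single arm', 'single leg', 'unilateral',
--     'bilateral', 'alternating', 'close grip', 'wide grip', 'narrow grip',
--     'neutral grip', 'overhand', 'underhand', 'hammer', 'reverse',
-- ]
--
-- MOVEMENT_WORDS = [
--     'press', 'row', 'curl', 'extension', 'raise', 'fly', 'flye', 'pulldown',
--     'pull down', 'pull up', 'chin up', 'push up', 'dip', 'squat', 'lunge',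
--     'deadlift', 'shrug', 'crunch', 'plank', 'hold', 'walk', 'carry', 'thrust',
--     'kickback', 'pushdown',
-- ]
--
-- def reorder_exercise_words(name):
--     """
--     Reorder words in an exercise name to follow the standard bare-name format:
--     [Position/Angle] [Target/Qualifier] [Movement]
--
--     Examples:
--         "incline press" → "incline press"  (already correct)
--         "press incline" → "incline press"
--         "row seated cable" → "seated row"  (cable already stripped upstream)
--     """
--     words = name.split()
--     if not words:
--         return name
--
--     position = []
--     movement = []
--     other = []
--     processed = set()
--
--     i = 0
--     while i < len(words):
--         if i in processed:
--             i += 1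
--             continue
--
--         # Check 2-word phrases
--         if i < len(words) - 1:
--             two_word = f"{words[i]} {words[i+1]}"
--             if two_word in POSITION_WORDS:
--                 position.append(two_word)
--                 processed.add(i)
--                 processed.add(i + 1)
--                 i += 2
--                 continue
--             if two_word in MOVEMENT_WORDS:
--                 movement.append(two_word)
--                 processed.add(i)
--                 processed.add(i + 1)
--                 i += 2
--                 continue
--
--         word = words[i]
--         if word in POSITION_WORDS:
--             position.append(word)
--             processed.add(i)
--         elif word in MOVEMENT_WORDS:
--             movement.append(word)
--             processed.add(i)
--         else:
--             other.append(word)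
--             processed.add(i)
--
--         i += 1
--
--     result = position + other + movement
--     return ' '.join(result) if result else name
-- ===== SOURCE B (Python) =====
-- POSITION_WORDS = [
--     'incline', 'decline', 'flat', 'seated', 'standing', 'lying', 'kneeling',
--     'prone', 'supine', 'bent over', 'single arm', 'single leg', 'unilateral',
--     'bilateral', 'alternating', 'close grip', 'wide grip', 'narrow grip',
--     'neutral grip', 'overhand', 'underhand', 'hammer', 'reverse',
-- ]
--
-- MOVEMENT_WORDS = [
--     'press', 'row', 'curl', 'extension', 'raise', 'fly', 'flye', 'pulldown',
--     'pull down', 'pull up', 'chin up', 'push up', 'dip', 'squat', 'lunge',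
--     'deadlift', 'shrug', 'crunch', 'plank', 'hold', 'walk', 'carry', 'thrust',
--     'kickback', 'pushdown',
-- ]
--
-- def _tokenize(words):
--     """Greedily split a word list into known 2-word phrases and single words."""
--     if not words:
--         return []
--     if len(words) >= 2:
--         two = words[0] + ' ' + words[1]
--         if two in POSITION_WORDS or two in MOVEMENT_WORDS:
--             return [two] + _tokenize(words[2:])
--     return [words[0]] + _tokenize(words[1:])
--
-- def reorder_exercise_words(name):
--     words = name.split()
--     if not words:
--         return name
--     position, movement, other = [], [], []
--     for token in _tokenize(words):
--         if token in POSITION_WORDS: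
--             position.append(token)
--         elif token in MOVEMENT_WORDS:
--             movement.append(token)
--         else:
--             other.append(token)
--     return ' '.join(position + other + movement)
-- ===== Notes on version B (the rewrite author's own statement) =====
-- stated objective: simpler
-- what changed: Replaced A's single interleaved index loop with a processed-index set by two separate passes: a greedy recursive tokenizer that splits the word list into known 2-word phrases and single words, then a classification fold that partitions the tokens into position/other/movement buckets.
import Mathlib
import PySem

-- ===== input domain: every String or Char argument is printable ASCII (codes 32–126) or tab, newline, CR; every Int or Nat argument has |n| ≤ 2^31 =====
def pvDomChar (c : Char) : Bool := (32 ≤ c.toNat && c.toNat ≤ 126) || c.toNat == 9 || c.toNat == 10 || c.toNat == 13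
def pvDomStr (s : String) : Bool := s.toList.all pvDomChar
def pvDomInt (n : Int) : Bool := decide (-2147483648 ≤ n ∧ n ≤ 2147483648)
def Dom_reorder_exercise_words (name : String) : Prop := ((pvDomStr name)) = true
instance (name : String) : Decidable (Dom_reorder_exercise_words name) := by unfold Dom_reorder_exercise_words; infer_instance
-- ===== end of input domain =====

-- B replaces A's single interleaved index-scan-with-processed-set by two separate passes
-- (greedy tokenization into known phrases, then a classification fold); objective: simpler.

-- ===== PORT A =====
def POSITION_WORDS : List String :=
  ["incline", "decline", "flat", "seated", "standing", "lying", "kneeling",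
   "prone", "supine", "bent over", "single arm", "single leg", "unilateral",
   "bilateral", "alternating", "close grip", "wide grip", "narrow grip",
   "neutral grip", "overhand", "underhand", "hammer", "reverse"]

def MOVEMENT_WORDS : List String :=
  ["press", "row", "curl", "extension", "raise", "fly", "flye", "pulldown",
   "pull down", "pull up", "chin up", "push up", "dip", "squat", "lunge",
   "deadlift", "shrug", "crunch", "plank", "hold", "walk", "carry", "thrust",
   "kickback", "pushdown"]

-- A's while-loop: state (position, movement, other, processed, i); returns position ++ other ++ movement
def pvAloop (words : List String) (i : Nat) (pos mov oth : List String)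
    (processed : PySem.Set Nat) : List String :=
  if h : i < words.length then
    if processed.contains i then
      pvAloop words (i + 1) pos mov oth processed
    else if h2 : i < words.length - 1 then
      let two_word := PySem.Str.join " " [words[i], words[i+1]'(by omega)]
      if POSITION_WORDS.contains two_word then
        pvAloop words (i + 2) (pos ++ [two_word]) mov oth
          ((processed.add i).add (i + 1))
      else if MOVEMENT_WORDS.contains two_word then
        pvAloop words (i + 2) pos (mov ++ [two_word]) oth
          ((processed.add i).add (i + 1))
      else
        let word := words[i]
        if POSITION_WORDS.contains word then
          pvAloop words (i + 1) (pos ++ [word]) mov oth (processed.add i)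
        else if MOVEMENT_WORDS.contains word then
          pvAloop words (i + 1) pos (mov ++ [word]) oth (processed.add i)
        else
          pvAloop words (i + 1) pos mov (oth ++ [word]) (processed.add i)
    else
      let word := words[i]
      if POSITION_WORDS.contains word then
        pvAloop words (i + 1) (pos ++ [word]) mov oth (processed.add i)
      else if MOVEMENT_WORDS.contains word then
        pvAloop words (i + 1) pos (mov ++ [word]) oth (processed.add i)
      else
        pvAloop words (i + 1) pos mov (oth ++ [word]) (processed.add i)
  else
    pos ++ oth ++ mov
termination_by words.length - i

def reorder_exercise_words (name : String) : String :=
  let words := PySem.Str.split₀ name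
  if words.isEmpty then name
  else
    let result := pvAloop words 0 [] [] [] PySem.Set.empty
    if result.isEmpty then name else PySem.Str.join " " result

-- ===== PORT B =====
-- Phase 1: greedy tokenization into known 2-word phrases and single words
def pvTokenize : List String → List String
  | [] => []
  | [w] => [w]
  | w1 :: w2 :: rest =>
    let two := PySem.Str.join " " [w1, w2]
    if POSITION_WORDS.contains two || MOVEMENT_WORDS.contains two then
      two :: pvTokenize rest
    else
      w1 :: pvTokenize (w2 :: rest)

-- Phase 2: classification step (accumulator = (position, movement, other))
def pvClassify (acc : List String × List String × List String) (t : String) :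
    List String × List String × List String :=
  if POSITION_WORDS.contains t then (acc.1 ++ [t], acc.2.1, acc.2.2)
  else if MOVEMENT_WORDS.contains t then (acc.1, acc.2.1 ++ [t], acc.2.2)
  else (acc.1, acc.2.1, acc.2.2 ++ [t])

def reorder_exercise_words_alt (name : String) : String :=
  let words := PySem.Str.split₀ name
  if words.isEmpty then name
  else
    let acc := (pvTokenize words).foldl pvClassify ([], [], [])
    PySem.Str.join " " (acc.1 ++ acc.2.2 ++ acc.2.1)

-- ===== PRECONDITION & SPEC =====
def Spec_reorder_exercise_words (name : String) (out : String) : Prop := out = reorder_exercise_words_alt name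
instance (name : String) (out : String) : Decidable (Spec_reorder_exercise_words name out) := by unfold Spec_reorder_exercise_words; infer_instance

-- ===== CLAIM (what is proved, stated in full; the proofs are below) =====
def Claim_equal_reorder_exercise_words : Prop := ∀ (name : String), Dom_reorder_exercise_words name → Spec_reorder_exercise_words name (reorder_exercise_words name)

-- ===== LEMMAS AND PROOFS =====

-- A's loop, started at i with a processed-set of indices below i, computes B's
-- tokenize-then-classify result on the suffix 'words.drop i'.
lemma pvAloop_eq (words : List String) : ∀ n i pos mov oth (processed : PySem.Set Nat),
    words.length - i = n → (∀ j ∈ processed, j < i) →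
    pvAloop words i pos mov oth processed =
      ((pvTokenize (words.drop i)).foldl pvClassify (pos, mov, oth)).1
        ++ ((pvTokenize (words.drop i)).foldl pvClassify (pos, mov, oth)).2.2
        ++ ((pvTokenize (words.drop i)).foldl pvClassify (pos, mov, oth)).2.1 := by
  intro n
  induction n using Nat.strong_induction_on with
  | _ n ih =>
    intro i pos mov oth processed hn hinv
    rw [pvAloop]
    by_cases h : i < words.length
    · have hc : processed.contains i = false := by
        rw [← Bool.not_eq_true, PySem.Set.contains_iff]
        exact fun hm => absurd (hinv i hm) (lt_irrefl i)
      rw [dif_pos h, hc]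
      simp only [Bool.false_eq_true, if_false]
      have hd1 : words.drop i = words[i] :: words.drop (i + 1) :=
        List.drop_eq_getElem_cons h
      have hinv1 : ∀ j ∈ processed.add i, j < i + 1 := by
        intro j hj
        rcases (PySem.Set.mem_add _ _ _).1 hj with hj' | rfl
        · exact Nat.lt_of_lt_of_le (hinv j hj') (by omega)
        · omega
      by_cases h2 : i < words.length - 1
      · have h2' : i + 1 < words.length := by omega
        have hd2 : words.drop (i + 1) = words[i+1] :: words.drop (i + 2) :=
          List.drop_eq_getElem_cons h2'
        rw [dif_pos h2]
        set two := PySem.Str.join " " [words[i], words[i+1]'h2'] with htwo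
        have hinv2 : ∀ j ∈ (processed.add i).add (i + 1), j < i + 2 := by
          intro j hj
          rcases (PySem.Set.mem_add _ _ _).1 hj with hj' | rfl
          · exact Nat.lt_of_lt_of_le (hinv1 j hj') (by omega)
          · omega
        by_cases hpos : two ∈ POSITION_WORDS
        · rw [if_pos (show POSITION_WORDS.contains two = true by simpa using hpos)]
          rw [ih (words.length - (i + 2)) (by omega) (i + 2) _ _ _ _ rfl hinv2]
          have htok : pvTokenize (words.drop i) = two :: pvTokenize (words.drop (i + 2)) := by
            rw [hd1, hd2, pvTokenize, ← htwo, if_pos (by simpa using Or.inl hpos)]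
          rw [htok]
          simp [List.foldl_cons, pvClassify, hpos]
        · rw [if_neg (show ¬ POSITION_WORDS.contains two = true by simpa using hpos)]
          by_cases hmov : two ∈ MOVEMENT_WORDS
          · rw [if_pos (show MOVEMENT_WORDS.contains two = true by simpa using hmov)]
            rw [ih (words.length - (i + 2)) (by omega) (i + 2) _ _ _ _ rfl hinv2]
            have htok : pvTokenize (words.drop i) = two :: pvTokenize (words.drop (i + 2)) := by
              rw [hd1, hd2, pvTokenize, ← htwo, if_pos (by simpa using Or.inr hmov)]
            rw [htok]
            simp [List.foldl_cons, pvClassify, hpos, hmov]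
          · rw [if_neg (show ¬ MOVEMENT_WORDS.contains two = true by simpa using hmov)]
            have htok : pvTokenize (words.drop i) = words[i] :: pvTokenize (words.drop (i + 1)) := by
              rw [hd1, hd2, pvTokenize, ← htwo]
              rw [if_neg (by simp; exact ⟨hpos, hmov⟩), ← hd2]
            rw [htok]
            by_cases hwp : words[i] ∈ POSITION_WORDS
            · rw [if_pos (show POSITION_WORDS.contains words[i] = true by simpa using hwp),
                ih (words.length - (i + 1)) (by omega) (i + 1) _ _ _ _ rfl hinv1]
              simp [List.foldl_cons, pvClassify, hwp]
            · rw [if_neg (show ¬ POSITION_WORDS.contains words[i] = true by simpa using hwp)]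
              by_cases hwm : words[i] ∈ MOVEMENT_WORDS
              · rw [if_pos (show MOVEMENT_WORDS.contains words[i] = true by simpa using hwm),
                  ih (words.length - (i + 1)) (by omega) (i + 1) _ _ _ _ rfl hinv1]
                simp [List.foldl_cons, pvClassify, hwp, hwm]
              · rw [if_neg (show ¬ MOVEMENT_WORDS.contains words[i] = true by simpa using hwm),
                  ih (words.length - (i + 1)) (by omega) (i + 1) _ _ _ _ rfl hinv1]
                simp [List.foldl_cons, pvClassify, hwp, hwm]
      · -- i is the last index: the suffix is the single word words[i]
        have hlast : i + 1 = words.length := by omega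
        have hdrop : words.drop (i + 1) = [] := by
          rw [hlast]; exact List.drop_length
        have htok : pvTokenize (words.drop i) = words[i] :: pvTokenize (words.drop (i + 1)) := by
          rw [hd1, hdrop]; rfl
        rw [dif_neg h2, htok]
        by_cases hwp : words[i] ∈ POSITION_WORDS
        · rw [if_pos (show POSITION_WORDS.contains words[i] = true by simpa using hwp),
            ih (words.length - (i + 1)) (by omega) (i + 1) _ _ _ _ rfl hinv1]
          simp [List.foldl_cons, pvClassify, hwp]
        · rw [if_neg (show ¬ POSITION_WORDS.contains words[i] = true by simpa using hwp)]
          by_cases hwm : words[i] ∈ MOVEMENT_WORDS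
          · rw [if_pos (show MOVEMENT_WORDS.contains words[i] = true by simpa using hwm),
              ih (words.length - (i + 1)) (by omega) (i + 1) _ _ _ _ rfl hinv1]
            simp [List.foldl_cons, pvClassify, hwp, hwm]
          · rw [if_neg (show ¬ MOVEMENT_WORDS.contains words[i] = true by simpa using hwm),
              ih (words.length - (i + 1)) (by omega) (i + 1) _ _ _ _ rfl hinv1]
            simp [List.foldl_cons, pvClassify, hwp, hwm]
    · rw [dif_neg h]
      rw [List.drop_eq_nil_of_le (by omega)]
      simp [pvTokenize]

-- each token adds exactly one word to one bucket
lemma pvClassify_len (toks : List String) :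
    ∀ acc : List String × List String × List String,
    ((toks.foldl pvClassify acc).1.length + (toks.foldl pvClassify acc).2.1.length
      + (toks.foldl pvClassify acc).2.2.length) =
      acc.1.length + acc.2.1.length + acc.2.2.length + toks.length := by
  induction toks with
  | nil => intro acc; simp
  | cons t ts ih =>
    intro acc
    rw [List.foldl_cons, ih]
    unfold pvClassify
    split_ifs <;> simp <;> omega

lemma pvTokenize_ne_nil (words : List String) (h : words ≠ []) : pvTokenize words ≠ [] := by
  match words with
  | [w] => simp [pvTokenize]
  | w1 :: w2 :: rest =>
    rw [pvTokenize]
    split_ifs <;> simp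

-- ===== VERDICT (by name: the statement is the Claim_ definition above) =====
theorem reorder_exercise_words_spec : Claim_equal_reorder_exercise_words := by
  intro name _
  unfold Spec_reorder_exercise_words reorder_exercise_words reorder_exercise_words_alt
  set ws := PySem.Str.split₀ name with hws
  by_cases hempty : ws.isEmpty
  · simp [hempty]
  · simp only [hempty, Bool.false_eq_true, if_false]
    have hmain := pvAloop_eq ws ws.length 0 [] [] [] PySem.Set.empty (by omega)
      (by intro j hj; simp [PySem.Set.empty] at hj)
    rw [List.drop_zero] at hmain
    rw [hmain]
    have hne : pvTokenize ws ≠ [] := pvTokenize_ne_nil ws (by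
      intro hnil; rw [hnil] at hempty; simp at hempty)
    have hlen := pvClassify_len (pvTokenize ws) ([], [], [])
    simp only [List.length_nil] at hlen
    have : ¬ (((pvTokenize ws).foldl pvClassify ([], [], [])).1
        ++ ((pvTokenize ws).foldl pvClassify ([], [], [])).2.2
        ++ ((pvTokenize ws).foldl pvClassify ([], [], [])).2.1).isEmpty := by
      rw [List.isEmpty_iff_length_eq_zero]
      simp only [List.length_append]
      have := List.length_pos_of_ne_nil hne
      omega
    simp only [this, Bool.false_eq_true, if_false]
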